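-- pv_equiv track=rewrite | github.com/wjs2063/BaekJoon | 프로그래머스/unrated/152995. 인사고과/인사고과.py | solution
-- ===== SOURCE A (Python) =====
-- def solution(scores):
--     answer = 0
--     x,y = scores[0]
--     s = x + y
--     scores.sort(key = lambda x:(-x[0],x[1]))
--     #내림차순,오름차순 정렬을 하게되면
--     # i < j 에 대하여 a[i][0] >= a[j][0] && a[i][1] <= a[j][1] 을 만족한다
--     #첫번쨰 기준으로 정렬했으므로 그다음부터는 같거나 감소하는 방식으로 간다.
--
--     prev = 0
--     for i,v in enumerate(scores):
--         if x < v[0] and y < v[1]:return -1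
--         if prev <= v[1]:
--             if s < sum(v):
--                 answer += 1
--             prev = v[1]
--     return answer + 1
-- ===== SOURCE B (Python) =====
-- def solution(scores):
--     # Return-value equivalence: A sorts `scores` in place, B leaves the list unmodified.
--     x, y = scores[0]
--     s = x + y
--     if any(x < e[0] and y < e[1] for e in scores):
--         return -1
--     return 1 + sum(
--         1
--         for v in scores
--         if s < sum(v)
--         and not any(v[0] < w[0] and v[1] < w[1] for w in scores)
--     )
-- ===== Notes on version B (the rewrite author's own statement) =====
-- stated objective: alternative
-- what changed: B drops A's sort-and-sweep entirely: instead of sorting by (-first, second) and sweeping with a running maximum, it directly counts the employees with no strict dominator and a total above employee 0's via a quadratic domination scan (and it does not mutate the argument, while A sorts it in place).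
-- intended difference: On inputs where nobody strictly dominates employee 0 but some undominated employee has a negative second score and a total above employee 0's, A's prev=0 initialisation skips that employee and undercounts the rank, while B counts every undominated employee with a strictly larger total, which is the intended ranking. — e.g. on solution([[1, 1], [5, -1]]): A returns 1, B returns 2
import Mathlib
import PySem

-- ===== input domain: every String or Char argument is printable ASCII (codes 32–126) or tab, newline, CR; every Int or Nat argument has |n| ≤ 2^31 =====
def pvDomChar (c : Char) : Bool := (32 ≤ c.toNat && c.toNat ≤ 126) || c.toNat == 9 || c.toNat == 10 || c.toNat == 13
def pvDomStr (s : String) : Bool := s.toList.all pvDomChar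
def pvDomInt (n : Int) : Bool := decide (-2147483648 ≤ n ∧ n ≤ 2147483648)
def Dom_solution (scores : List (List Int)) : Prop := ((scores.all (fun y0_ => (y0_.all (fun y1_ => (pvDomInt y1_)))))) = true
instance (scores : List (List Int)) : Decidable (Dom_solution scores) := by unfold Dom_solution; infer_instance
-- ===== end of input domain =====

-- B replaces A's sort-and-sweep by a sortless quadratic scan (count employees with no strict
-- dominator and a larger total); equivalence is about the RETURN value only — A sorts `scores`
-- in place, B leaves the argument unmodified.

-- shared primitive: v[i] under Pre_ (index always in range there; getD 0 never the raising case inside Pre_)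
def pvIdx (v : List Int) (i : Int) : Int := (PySem.List.pyGet? v i).getD 0

-- ===== PORT A =====
-- A's single loop over the sorted list: domination check and counting interleaved, early return -1
def loopA (x y s : Int) (prev answer : Int) : List (List Int) → Int
  | [] => answer + 1
  | v :: rest =>
    if x < pvIdx v 0 ∧ y < pvIdx v 1 then -1
    else if prev ≤ pvIdx v 1 then
      if s < v.sum then loopA x y s (pvIdx v 1) (answer + 1) rest
      else loopA x y s (pvIdx v 1) answer rest
    else loopA x y s prev answer rest

def solution (scores : List (List Int)) : Int :=
  let x := pvIdx (scores.headD []) 0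
  let y := pvIdx (scores.headD []) 1
  let s := x + y
  let sortedScores := PySem.List.sorted2 scores (fun p => -(pvIdx p 0)) (fun p => pvIdx p 1)
  loopA x y s 0 0 sortedScores

-- ===== PORT B =====
def solution_alt (scores : List (List Int)) : Int :=
  let x := pvIdx (scores.headD []) 0
  let y := pvIdx (scores.headD []) 1
  let s := x + y
  if scores.any (fun e => decide (x < pvIdx e 0 ∧ y < pvIdx e 1)) then -1
  else
    1 + (scores.countP (fun v =>
      decide (s < v.sum) &&
      !(scores.any (fun w => decide (pvIdx v 0 < pvIdx w 0 ∧ pvIdx v 1 < pvIdx w 1)))) : Int)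

-- ===== PRECONDITION & SPEC =====
-- Pre_ excludes exactly the inputs where Python A raises: the empty list (scores[0] → IndexError),
-- a first element whose length is not 2 (the unpacking x,y = scores[0] → ValueError), and any
-- element shorter than 2 (v[1] → IndexError).
def Pre_solution (scores : List (List Int)) : Prop :=
  scores ≠ [] ∧ (scores.headD []).length = 2 ∧ ∀ v ∈ scores, 2 ≤ v.length
instance (scores : List (List Int)) : Decidable (Pre_solution scores) := by
  unfold Pre_solution; infer_instance

def pvWitness_solution : List (List Int) := [[2, 2], [1, 4], [3, 2]]

-- On inputs where nobody strictly dominates employee 0 but some undominated employee has a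
-- negative second score and a total above employee 0's, A's `prev = 0` initialisation silently
-- skips that employee and undercounts the rank, while B counts every undominated employee with a
-- strictly larger total, which is the intended ranking.
-- v is strictly beaten in both scores by someone in the list
def dominatedIn (scores : List (List Int)) (v : List Int) : Prop :=
  ∃ w ∈ scores, v.getD 0 0 < w.getD 0 0 ∧ v.getD 1 0 < w.getD 1 0

def D_solution (scores : List (List Int)) : Prop :=
  ¬ dominatedIn scores (scores.headD []) ∧
  ∃ v ∈ scores, v.getD 1 0 < 0 ∧ (scores.headD []).sum < v.sum ∧ ¬ dominatedIn scores v
instance (scores : List (List Int)) : Decidable (D_solution scores) := by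
  unfold D_solution dominatedIn; infer_instance

def Spec_solution (scores : List (List Int)) (out : Int) : Prop := ¬ D_solution scores → out = solution_alt scores
instance (scores : List (List Int)) (out : Int) : Decidable (Spec_solution scores out) := by unfold Spec_solution; infer_instance

def pvDiffWitness_solution : List (List Int) := [[1, 1], [5, -1]]
def pvDiffWitnessOut_solution : Int × Int := (1, 2)

-- ===== CLAIM (what is proved, stated in full; the proofs are below) =====
def Claim_unchanged_solution : Prop := ∀ (scores : List (List Int)), Dom_solution scores → Pre_solution scores → Spec_solution scores (solution scores)
def Claim_changed_solution : Prop := Dom_solution (pvDiffWitness_solution) ∧ Pre_solution (pvDiffWitness_solution) ∧ D_solution (pvDiffWitness_solution) ∧ solution (pvDiffWitness_solution) = pvDiffWitnessOut_solution.1 ∧ solution_alt (pvDiffWitness_solution) = pvDiffWitnessOut_solution.2 ∧ pvDiffWitnessOut_solution.1 ≠ pvDiffWitnessOut_solution.2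
def Claim_exact_solution : Prop := ∀ (scores : List (List Int)), Dom_solution scores → Pre_solution scores → D_solution scores → solution scores ≠ solution_alt scores

-- ===== LEMMAS AND PROOFS =====

-- the strict comparison sorted2 uses for A's key (-v[0], v[1])
def ltB (u w : List Int) : Bool :=
  decide (-(pvIdx u 0) < -(pvIdx w 0)) || (!decide (-(pvIdx w 0) < -(pvIdx u 0)) && decide (pvIdx u 1 < pvIdx w 1))

-- "no strict dominator of v inside L", exactly B's inner pass
def noDomB (L : List (List Int)) (v : List Int) : Bool :=
  !(L.any (fun w => decide (pvIdx v 0 < pvIdx w 0 ∧ pvIdx v 1 < pvIdx w 1)))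

-- A's loop split into its two effects (proof-side helpers)
def domPass (x y : Int) : List (List Int) → Bool
  | [] => false
  | e :: rest => if x < pvIdx e 0 ∧ y < pvIdx e 1 then true else domPass x y rest

def countPass (s prev count : Int) : List (List Int) → Int
  | [] => count + 1
  | v :: rest =>
    if prev ≤ pvIdx v 1 then
      if s < v.sum then countPass s (pvIdx v 1) (count + 1) rest
      else countPass s (pvIdx v 1) count rest
    else countPass s prev count rest

theorem loopA_eq (x y s : Int) :
    ∀ (l : List (List Int)) (prev answer : Int),
      loopA x y s prev answer l =
        if domPass x y l then -1 else countPass s prev answer l := by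
  intro l
  induction l with
  | nil => intro prev answer; simp [loopA, domPass, countPass]
  | cons v rest ih =>
    intro prev answer
    by_cases hd : x < pvIdx v 0 ∧ y < pvIdx v 1
    · simp [loopA, domPass, hd]
    · by_cases hp : prev ≤ pvIdx v 1
      · by_cases hs : s < v.sum
        · simp [loopA, domPass, countPass, hd, hp, hs, ih]
        · simp [loopA, domPass, countPass, hd, hp, hs, ih]
      · simp [loopA, domPass, countPass, hd, hp, ih]

theorem domPass_eq_any (x y : Int) (l : List (List Int)) :
    domPass x y l = l.any (fun v => decide (x < pvIdx v 0 ∧ y < pvIdx v 1)) := by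
  induction l with
  | nil => rfl
  | cons v rest ih =>
    by_cases hd : x < pvIdx v 0 ∧ y < pvIdx v 1 <;> simp [domPass, hd, ih]

-- sorted2 with A's keys is the insertBy fold with comparison ltB
theorem sorted2_eq_foldl (scores : List (List Int)) :
    PySem.List.sorted2 scores (fun p => -(pvIdx p 0)) (fun p => pvIdx p 1) =
      scores.foldl (fun acc x => PySem.List.insertBy ltB x acc) [] := rfl

theorem ltB_asymm (a b : List Int) (h : ltB a b = true) : ltB b a = false := by
  simp [ltB] at *; omega

theorem ltB_negtrans (a b c : List Int) (h1 : ltB b a = false) (h2 : ltB c b = false) :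
    ltB c a = false := by
  simp [ltB] at *; omega

theorem insertBy_pairwise_ltB (x : List Int) (ys : List (List Int))
    (h : ys.Pairwise (fun a b => ltB b a = false)) :
    (PySem.List.insertBy ltB x ys).Pairwise (fun a b => ltB b a = false) := by
  induction ys with
  | nil => simp [PySem.List.insertBy]
  | cons y ys ih =>
    rcases List.pairwise_cons.mp h with ⟨hy, hys⟩
    by_cases hb : ltB x y = true
    · rw [show PySem.List.insertBy ltB x (y :: ys) = x :: y :: ys by
        simp [PySem.List.insertBy, hb]]
      refine List.pairwise_cons.mpr ⟨?_, h⟩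
      intro z hz
      rcases List.mem_cons.mp hz with rfl | hz
      · exact ltB_asymm _ _ hb
      · exact ltB_negtrans _ _ _ (ltB_asymm _ _ hb) (hy z hz)
    · rw [show PySem.List.insertBy ltB x (y :: ys) = y :: PySem.List.insertBy ltB x ys by
        simp [PySem.List.insertBy, hb]]
      refine List.pairwise_cons.mpr ⟨?_, ih hys⟩
      intro z hz
      rcases (PySem.List.insertBy_mem_iff _ _ _ _).mp hz with rfl | hz
      · simpa using hb
      · exact hy z hz

theorem foldl_insertBy_pairwise (xs : List (List Int)) :
    ∀ acc : List (List Int), acc.Pairwise (fun a b => ltB b a = false) →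
      (xs.foldl (fun acc x => PySem.List.insertBy ltB x acc) acc).Pairwise
        (fun a b => ltB b a = false) := by
  induction xs with
  | nil => intro acc h; simpa using h
  | cons x xs ih => intro acc h; exact ih _ (insertBy_pairwise_ltB x acc h)

-- the sorted-list relation, unpacked: w comes (weakly) after v
theorem ltB_false_iff (w v : List Int) :
    ltB w v = false ↔ pvIdx w 0 ≤ pvIdx v 0 ∧ (pvIdx w 0 < pvIdx v 0 ∨ pvIdx v 1 ≤ pvIdx w 1) := by
  simp [ltB]; omega

-- xs[0]/xs[1] of the ports coincide with List.getD at nonnegative in-range-or-default indices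
theorem pvIdx0 (v : List Int) : pvIdx v 0 = v.getD 0 0 := by
  rcases v with _ | ⟨a, t⟩ <;> simp [pvIdx, PySem.List.pyGet?, PySem.List.pyIdx?]

theorem pvIdx1 (v : List Int) : pvIdx v 1 = v.getD 1 0 := by
  rcases v with _ | ⟨a, _ | ⟨b, t⟩⟩ <;> simp [pvIdx, PySem.List.pyGet?, PySem.List.pyIdx?]

-- the first row has length 2 under Pre_, so its Python sum is x + y
theorem head_sum (l : List Int) (h : l.length = 2) : l.sum = l.getD 0 0 + l.getD 1 0 := by
  rcases l with _ | ⟨a, _ | ⟨b, _ | ⟨c, t⟩⟩⟩ <;> simp_all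

-- D_solution, re-read through the ports' accessor
theorem D_iff (scores : List (List Int)) (hpre : Pre_solution scores) : D_solution scores ↔
    ((∀ e ∈ scores, ¬(pvIdx (scores.headD []) 0 < pvIdx e 0 ∧
        pvIdx (scores.headD []) 1 < pvIdx e 1)) ∧
     ∃ v ∈ scores, pvIdx v 1 < 0 ∧
       pvIdx (scores.headD []) 0 + pvIdx (scores.headD []) 1 < v.sum ∧
       ∀ w ∈ scores, ¬(pvIdx v 0 < pvIdx w 0 ∧ pvIdx v 1 < pvIdx w 1)) := by
  unfold D_solution dominatedIn
  rw [head_sum _ hpre.2.1]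
  simp only [pvIdx0, pvIdx1, not_exists]
  constructor
  · rintro ⟨h1, v, hv, h2, h3, h4⟩
    exact ⟨fun e he hc => h1 e ⟨he, hc⟩, v, hv, h2, h3, fun w hw hc => h4 w ⟨hw, hc⟩⟩
  · rintro ⟨h1, v, hv, h2, h3, h4⟩
    exact ⟨fun e he => h1 e he.1 he.2, v, hv, h2, h3, fun w hw => h4 w hw.1 hw.2⟩

-- A's counting sweep over a sorted list counts the undominated employees with second score ≥ prev
theorem countPass_eq (s : Int) :
    ∀ (L : List (List Int)), L.Pairwise (fun a b => ltB b a = false) →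
      ∀ (prev c : Int),
        countPass s prev c L =
          c + 1 + (L.countP (fun v =>
            decide (prev ≤ pvIdx v 1) && noDomB L v && decide (s < v.sum)) : Int) := by
  intro L
  induction L with
  | nil => intro _ prev c; simp [countPass]
  | cons v rest ih =>
    intro hpw prev c
    rcases List.pairwise_cons.mp hpw with ⟨hall, hrest⟩
    have hrel : ∀ w ∈ rest,
        pvIdx w 0 ≤ pvIdx v 0 ∧ (pvIdx w 0 < pvIdx v 0 ∨ pvIdx v 1 ≤ pvIdx w 1) :=
      fun w hw => (ltB_false_iff w v).mp (hall w hw)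
    have hnd : noDomB (v :: rest) v = true := by
      simp only [noDomB, Bool.not_eq_true', List.any_eq_false]
      intro w hw
      rcases List.mem_cons.mp hw with rfl | hw
      · simp
      · have := hrel w hw; simp; omega
    by_cases hp : prev ≤ pvIdx v 1
    · have hcp : List.countP (fun w =>
            decide (prev ≤ pvIdx w 1) && noDomB (v :: rest) w && decide (s < w.sum)) rest =
          List.countP (fun w =>
            decide (pvIdx v 1 ≤ pvIdx w 1) && noDomB rest w && decide (s < w.sum)) rest := by
        apply List.countP_congr
        intro w hw
        have hr := hrel w hw
        constructor <;>
          · simp only [noDomB, List.any_cons, Bool.not_or, ← Bool.and_assoc]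
            cases hany : rest.any (fun u =>
                decide (pvIdx w 0 < pvIdx u 0 ∧ pvIdx w 1 < pvIdx u 1)) <;>
              · simp
                all_goals omega
      by_cases hs : s < v.sum
      · simp only [countPass, if_pos hp, if_pos hs, List.countP_cons]
        rw [ih hrest, hcp, hnd]
        simp [hp, hs]
        all_goals omega
      · simp only [countPass, if_pos hp, if_neg hs, List.countP_cons]
        rw [ih hrest, hcp, hnd]
        simp [hp, hs]
    · have hcp : List.countP (fun w =>
            decide (prev ≤ pvIdx w 1) && noDomB (v :: rest) w && decide (s < w.sum)) rest =
          List.countP (fun w =>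
            decide (prev ≤ pvIdx w 1) && noDomB rest w && decide (s < w.sum)) rest := by
        apply List.countP_congr
        intro w hw
        have hr := hrel w hw
        have hpv : ¬ prev ≤ pvIdx v 1 := hp
        constructor <;>
          · simp only [noDomB, List.any_cons, Bool.not_or, ← Bool.and_assoc]
            cases hany : rest.any (fun u =>
                decide (pvIdx w 0 < pvIdx u 0 ∧ pvIdx w 1 < pvIdx u 1)) <;>
              · simp
                all_goals omega
      simp only [countPass, if_neg hp, List.countP_cons]
      rw [ih hrest, hcp]
      simp [hp]

-- closed form of A: the same -1 test as B, else 1 + count of v with 0 ≤ v[1], undominated, sum > s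
theorem solution_closed (scores : List (List Int)) :
    solution scores =
      if scores.any (fun e => decide (pvIdx (scores.headD []) 0 < pvIdx e 0 ∧
            pvIdx (scores.headD []) 1 < pvIdx e 1)) then -1
      else 1 + (scores.countP (fun v =>
        decide (0 ≤ pvIdx v 1) && noDomB scores v &&
        decide (pvIdx (scores.headD []) 0 + pvIdx (scores.headD []) 1 < v.sum)) : Int) := by
  have hperm := PySem.List.sorted2_perm (xs := scores) (k1 := fun p => -(pvIdx p 0))
    (k2 := fun p => pvIdx p 1) (rev := false)
  have hpw : (PySem.List.sorted2 scores (fun p => -(pvIdx p 0)) (fun p => pvIdx p 1)).Pairwise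
      (fun a b => ltB b a = false) := by
    rw [sorted2_eq_foldl]; exact foldl_insertBy_pairwise scores [] (by simp)
  unfold solution
  rw [loopA_eq, domPass_eq_any, hperm.any_eq, countPass_eq _ _ hpw]
  rw [List.countP_congr (fun w hw => by
    rw [show noDomB (PySem.List.sorted2 scores (fun p => -(pvIdx p 0)) (fun p => pvIdx p 1)) w =
        noDomB scores w from by unfold noDomB; rw [hperm.any_eq]])]
  rw [hperm.countP_eq]
  simp only [zero_add]

theorem countP_lt_of_witness {α : Type} (p q : α → Bool) :
    ∀ (L : List α), (∀ x ∈ L, p x = true → q x = true) →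
      ∀ x ∈ L, q x = true → p x = false → L.countP p < L.countP q := by
  intro L
  induction L with
  | nil => intro _ x hx; simp at hx
  | cons a L ih =>
    intro hmono x hx hq hp
    have hmono' : ∀ y ∈ L, p y = true → q y = true := fun y hy => hmono y (List.mem_cons_of_mem a hy)
    have hle : L.countP p ≤ L.countP q := List.countP_mono_left hmono'
    rcases List.mem_cons.mp hx with rfl | hx
    · simp [hq, hp]; omega
    · have := ih hmono' x hx hq hp
      simp only [List.countP_cons]
      by_cases ha : p a = true
      · simp [ha, hmono a (List.mem_cons_self) ha]; omega
      · simp only [Bool.not_eq_true] at ha; simp [ha]; omega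

-- bridging D_'s Prop clauses with the Bool tests
theorem noDomB_iff (scores : List (List Int)) (v : List Int) :
    noDomB scores v = true ↔ ∀ w ∈ scores, ¬(pvIdx v 0 < pvIdx w 0 ∧ pvIdx v 1 < pvIdx w 1) := by
  simp [noDomB]

-- ===== VERDICT (by name: the statement is the Claim_ definition above) =====
theorem solution_spec : Claim_unchanged_solution := by
  intro scores _ hpre hD
  rw [solution_closed]
  simp only [solution_alt]
  split_ifs with hany
  · rfl
  · rw [Bool.not_eq_true] at hany
    have hfst : ∀ e ∈ scores, ¬(pvIdx (scores.headD []) 0 < pvIdx e 0 ∧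
        pvIdx (scores.headD []) 1 < pvIdx e 1) := by
      intro e he; simpa using List.any_eq_false.mp hany e he
    have hnobad : ¬ ∃ v ∈ scores, pvIdx v 1 < 0 ∧
        pvIdx (scores.headD []) 0 + pvIdx (scores.headD []) 1 < v.sum ∧
        ∀ w ∈ scores, ¬(pvIdx v 0 < pvIdx w 0 ∧ pvIdx v 1 < pvIdx w 1) :=
      fun hb => hD ((D_iff scores hpre).mpr ⟨hfst, hb⟩)
    have hnobad' : ∀ v ∈ scores, pvIdx v 1 < 0 →
        pvIdx (scores.headD []) 0 + pvIdx (scores.headD []) 1 < v.sum →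
        ∃ w ∈ scores, pvIdx v 0 < pvIdx w 0 ∧ pvIdx v 1 < pvIdx w 1 := by
      intro v hv h1 h2
      by_contra hw
      exact hnobad ⟨v, hv, h1, h2, fun w hw' hc => hw ⟨w, hw', hc⟩⟩
    have hcount : scores.countP (fun v =>
          decide (0 ≤ pvIdx v 1) && noDomB scores v &&
          decide (pvIdx (scores.headD []) 0 + pvIdx (scores.headD []) 1 < v.sum)) =
        scores.countP (fun v =>
          decide (pvIdx (scores.headD []) 0 + pvIdx (scores.headD []) 1 < v.sum) &&
          !(scores.any (fun w => decide (pvIdx v 0 < pvIdx w 0 ∧ pvIdx v 1 < pvIdx w 1)))) := by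
      apply List.countP_congr
      intro v hv
      by_cases hdom : (scores.any fun w =>
          decide (pvIdx v 0 < pvIdx w 0 ∧ pvIdx v 1 < pvIdx w 1)) = true
      · simp only [noDomB, hdom, Bool.not_true, Bool.and_false, Bool.false_and]
      · rw [Bool.not_eq_true] at hdom
        have hnd' : ∀ w ∈ scores, ¬(pvIdx v 0 < pvIdx w 0 ∧ pvIdx v 1 < pvIdx w 1) := by
          intro w hw; simpa using List.any_eq_false.mp hdom w hw
        have h0 : pvIdx (scores.headD []) 0 + pvIdx (scores.headD []) 1 < v.sum →
            0 ≤ pvIdx v 1 := by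
          intro hsum
          by_contra hneg
          rcases hnobad' v hv (by omega) hsum with ⟨w, hw, hww⟩
          exact (hnd' w hw) hww
        simp only [noDomB, hdom, Bool.not_false, Bool.and_true,
          Bool.and_eq_true, decide_eq_true_eq]
        omega
    rw [hcount]

theorem solution_changed : Claim_changed_solution := by
  unfold Claim_changed_solution; decide

theorem solution_tight : Claim_exact_solution := by
  intro scores _ hpre hD
  rcases (D_iff scores hpre).mp hD with ⟨hfst, v, hv, hv1, hvs, hvnd⟩
  have hany : scores.any (fun e => decide (pvIdx (scores.headD []) 0 < pvIdx e 0 ∧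
      pvIdx (scores.headD []) 1 < pvIdx e 1)) = false := by
    apply List.any_eq_false.mpr
    intro e he; simpa using hfst e he
  rw [solution_closed]
  unfold solution_alt
  simp only [hany, if_neg Bool.false_ne_true]
  have hlt : scores.countP (fun v =>
        decide (0 ≤ pvIdx v 1) && noDomB scores v &&
        decide (pvIdx (scores.headD []) 0 + pvIdx (scores.headD []) 1 < v.sum)) <
      scores.countP (fun v =>
        decide (pvIdx (scores.headD []) 0 + pvIdx (scores.headD []) 1 < v.sum) &&
        noDomB scores v) := by
    apply countP_lt_of_witness _ _ scores
    · intro x _ hx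
      simp only [Bool.and_eq_true, decide_eq_true_eq] at hx ⊢
      exact ⟨hx.2, hx.1.2⟩
    · exact hv
    · simp only [Bool.and_eq_true, decide_eq_true_eq]
      exact ⟨hvs, (noDomB_iff scores v).mpr hvnd⟩
    · simp only [Bool.and_eq_false_iff]
      left; left; simpa using (by omega : ¬ (0 ≤ pvIdx v 1))
  simp only [noDomB] at hlt ⊢
  omega
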